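-- pv_equiv track=rewrite | github.com/jeffliu-pp/data-science-quality | Quality.py | _MODIFY_PERI
-- ===== SOURCE A (Python) =====
-- PERI_LIST = ['breakfast','lunch','dinner','meal','food','snack','milk','bedtime']
--
-- def _MODIFY_PERI(ROW, NAME, MEDICATIONS):
--     PERI = ROW[NAME]
--     info = set()
--     for p in PERI:
--         find = False
--         for i in ['at','as','with']:
--             for j in PERI_LIST:
--                 if i + ' ' + j == p:
--                     if j == 'food':
--                         j = 'meal'
--                     info.add(j)
--                     find = True
--                     break
--             if find == True:
--                 break
--         if find == False:
--             info.add(p)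
--     return info
-- ===== SOURCE B (Python) =====
-- PERI_LIST = ['breakfast','lunch','dinner','meal','food','snack','milk','bedtime']
--
-- def _MODIFY_PERI(ROW, NAME, MEDICATIONS):
--     info = set()
--     for p in ROW[NAME]:
--         head, sep, rest = p.partition(' ')
--         if sep and head in ('at', 'as', 'with') and rest in PERI_LIST:
--             info.add('meal' if rest == 'food' else rest)
--         else:
--             info.add(p)
--     return info
-- ===== Notes on version B (the rewrite author's own statement) =====
-- stated objective: alternative
-- what changed: B parses each period string with str.partition(' ') into prefix and remainder and validates the two parts by membership, instead of A's generate-and-test nested scan over all 24 prefix+food concatenations with a find-flag and breaks.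
import Mathlib
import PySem

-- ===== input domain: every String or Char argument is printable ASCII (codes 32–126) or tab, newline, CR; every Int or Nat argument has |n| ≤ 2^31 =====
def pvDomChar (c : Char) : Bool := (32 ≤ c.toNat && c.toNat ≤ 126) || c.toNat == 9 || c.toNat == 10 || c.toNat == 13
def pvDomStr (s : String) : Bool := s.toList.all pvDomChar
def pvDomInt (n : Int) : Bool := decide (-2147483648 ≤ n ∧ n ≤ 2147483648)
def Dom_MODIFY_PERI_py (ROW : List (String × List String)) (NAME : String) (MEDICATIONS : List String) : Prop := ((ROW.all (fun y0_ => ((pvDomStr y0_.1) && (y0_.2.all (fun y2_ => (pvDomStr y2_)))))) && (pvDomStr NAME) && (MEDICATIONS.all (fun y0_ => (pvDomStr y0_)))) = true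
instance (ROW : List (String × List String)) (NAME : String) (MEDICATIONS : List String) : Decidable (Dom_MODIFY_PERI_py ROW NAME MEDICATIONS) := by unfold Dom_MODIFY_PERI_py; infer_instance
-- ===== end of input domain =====

-- B parses each period string once (str.partition at the first space) and validates the two
-- parts by membership, instead of A's generate-and-test nested scan over the 24 prefix+food
-- concatenations with a find-flag (objective: alternative).
-- Both programs raise KeyError when NAME is not a key of ROW; Pre_ excludes exactly those inputs.

-- ===== PORT A =====
def pvPeriList : List String := ["breakfast","lunch","dinner","meal","food","snack","milk","bedtime"]

-- inner 'for j in PERI_LIST: … break' (returns the added value on a hit)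
def pvScanJ (i p : String) : List String → Option String
  | [] => none
  | j :: rest =>
    if i ++ " " ++ j == p then some (if j == "food" then "meal" else j)
    else pvScanJ i p rest

-- outer 'for i in ['at','as','with']: … if find: break'
def pvScanI (p : String) : List String → Option String
  | [] => none
  | i :: rest =>
    match pvScanJ i p pvPeriList with
    | some v => some v
    | none => pvScanI p rest

def MODIFY_PERI_py (ROW : List (String × List String)) (NAME : String) (MEDICATIONS : List String) : List String :=
  let PERI := ((PySem.Dict.mk ROW).get? NAME).getD []   -- Pre_ guarantees the key is present
  PERI.foldl (fun info p =>
    match pvScanI p ["at", "as", "with"] with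
    | some v => PySem.Set.add info v
    | none => PySem.Set.add info p) PySem.Set.empty

-- ===== PORT B =====
-- p.partition(' '): split at the FIRST space; 'none' = no space found (Python's sep == '').
-- Hand port (exact: Python's str.partition at a single ASCII space = split at the first ' ').
def pvPartSp : List Char → Option (List Char × List Char)
  | [] => none
  | c :: cs =>
    if c = ' ' then some ([], cs)
    else (pvPartSp cs).map (fun q => (c :: q.1, q.2))

-- the body of B's loop: parse p, validate head and rest, normalize 'food' to 'meal'
def pvStepB (p : String) : String :=
  match pvPartSp p.toList with
  | none => p
  | some (a, b) =>
    let head := String.ofList a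
    let rest := String.ofList b
    if (head == "at" || head == "as" || head == "with") && pvPeriList.contains rest then
      if rest == "food" then "meal" else rest
    else p

def MODIFY_PERI_py_alt (ROW : List (String × List String)) (NAME : String) (MEDICATIONS : List String) : List String :=
  (((PySem.Dict.mk ROW).get? NAME).getD []).foldl
    (fun info p => PySem.Set.add info (pvStepB p)) PySem.Set.empty

-- ===== PRECONDITION & SPEC =====
-- Pre_ excludes exactly the inputs where NAME is not a key of ROW: there A (ROW[NAME]) raises KeyError (B does too).
def Pre_MODIFY_PERI_py (ROW : List (String × List String)) (NAME : String) (MEDICATIONS : List String) : Prop :=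
  NAME ∈ ROW.map Prod.fst
instance (ROW : List (String × List String)) (NAME : String) (MEDICATIONS : List String) : Decidable (Pre_MODIFY_PERI_py ROW NAME MEDICATIONS) := by unfold Pre_MODIFY_PERI_py; infer_instance

def pvWitness_MODIFY_PERI_py : (List (String × List String)) × String × List String :=
  ([("k", ["at food", "snack", "xx"])], "k", [])

def Spec_MODIFY_PERI_py (ROW : List (String × List String)) (NAME : String) (MEDICATIONS : List String) (out : List String) : Prop := out = MODIFY_PERI_py_alt ROW NAME MEDICATIONS
instance (ROW : List (String × List String)) (NAME : String) (MEDICATIONS : List String) (out : List String) : Decidable (Spec_MODIFY_PERI_py ROW NAME MEDICATIONS out) := by unfold Spec_MODIFY_PERI_py; infer_instance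

-- ===== CLAIM (what is proved, stated in full; the proofs are below) =====
def Claim_equal_MODIFY_PERI_py : Prop := ∀ (ROW : List (String × List String)) (NAME : String) (MEDICATIONS : List String), Dom_MODIFY_PERI_py ROW NAME MEDICATIONS → Pre_MODIFY_PERI_py ROW NAME MEDICATIONS → Spec_MODIFY_PERI_py ROW NAME MEDICATIONS (MODIFY_PERI_py ROW NAME MEDICATIONS)

-- ===== LEMMAS AND PROOFS =====

theorem pvPartSp_none {l : List Char} (h : pvPartSp l = none) : ' ' ∉ l := by
  induction l with
  | nil => simp
  | cons c cs ih =>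
    simp only [pvPartSp] at h
    split at h
    · exact absurd h (by simp)
    · rename_i hc
      cases hp : pvPartSp cs with
      | none =>
        intro hm
        rcases List.mem_cons.mp hm with h' | h'
        · exact hc h'.symm
        · exact ih hp h'
      | some q => simp [hp] at h

theorem pvPartSp_some {l a b : List Char} (h : pvPartSp l = some (a, b)) :
    l = a ++ ' ' :: b ∧ ' ' ∉ a := by
  induction l generalizing a b with
  | nil => simp [pvPartSp] at h
  | cons c cs ih =>
    simp only [pvPartSp] at h
    split at h
    · rename_i hc
      obtain ⟨rfl, rfl⟩ : a = [] ∧ cs = b := by simpa using h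
      simp [hc]
    · rename_i hc
      cases hp : pvPartSp cs with
      | none => simp [hp] at h
      | some q =>
        obtain ⟨q1, q2⟩ := q
        simp only [hp, Option.map_some] at h
        obtain ⟨ha, rfl⟩ : c :: q1 = a ∧ q2 = b := by simpa using h
        obtain ⟨h1, h2⟩ := ih hp
        subst h1
        refine ⟨by rw [← ha]; simp, ?_⟩
        rw [← ha]
        intro hm
        rcases List.mem_cons.mp hm with h' | h'
        · exact hc h'.symm
        · exact h2 h'

-- uniqueness of the first-space split
theorem pvSplit_unique {i a x y : List Char} (hi : ' ' ∉ i) (ha : ' ' ∉ a) :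
    i ++ ' ' :: x = a ++ ' ' :: y ↔ i = a ∧ x = y := by
  constructor
  · intro h
    induction i generalizing a with
    | nil =>
      cases a with
      | nil => simpa using h
      | cons d a' => simp at h; simp [← h.1] at ha
    | cons c i' ih =>
      cases a with
      | nil => simp at h; simp [h.1] at hi
      | cons d a' =>
        simp only [List.cons_append, List.cons.injEq] at h
        have := ih (by simp at hi; exact hi.2) (by simp at ha; exact ha.2) h.2
        exact ⟨by simp [h.1, this.1], this.2⟩
  · rintro ⟨rfl, rfl⟩; rfl

theorem pvStr_eq_iff (s t : String) : s = t ↔ s.toList = t.toList := String.toList_inj.symm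

-- the test A performs, rephrased through the split of p
theorem pvTest_iff {p : String} {a b : List Char} (i j : String)
    (hp : p.toList = a ++ ' ' :: b) (ha : ' ' ∉ a)
    (hi : ' ' ∉ i.toList) (hj : ' ' ∉ j.toList) :
    (i ++ " " ++ j = p) ↔ (i.toList = a ∧ j.toList = b) := by
  rw [pvStr_eq_iff, hp]
  have : (i ++ " " ++ j).toList = i.toList ++ ' ' :: j.toList := by simp
  rw [this, pvSplit_unique hi ha]

-- A's inner scan, characterised through the split of p
theorem pvScanJ_char {p : String} {a b : List Char} (i : String)
    (hp : p.toList = a ++ ' ' :: b) (ha : ' ' ∉ a) (hi : ' ' ∉ i.toList)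
    (js : List String) (hjs : ∀ j ∈ js, ' ' ∉ j.toList) :
    pvScanJ i p js =
      if i.toList = a then
        (js.find? (fun j => j.toList == b)).map (fun j => if j == "food" then "meal" else j)
      else none := by
  induction js with
  | nil => simp [pvScanJ]
  | cons j r ih =>
    have hj : ' ' ∉ j.toList := hjs j (by simp)
    have hr : ∀ j' ∈ r, ' ' ∉ j'.toList := fun j' hm => hjs j' (by simp [hm])
    simp only [pvScanJ, List.find?_cons]
    by_cases hcond : i ++ " " ++ j = p
    · have := (pvTest_iff i j hp ha hi hj).mp hcond
      simp [hcond, this.1, this.2]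
    · have hne : ¬ (i.toList = a ∧ j.toList = b) := fun h => hcond ((pvTest_iff i j hp ha hi hj).mpr h)
      rw [if_neg (by simpa using hcond), ih hr]
      by_cases hia : i.toList = a
      · have hjb : (j.toList == b) = false := by
          simp only [beq_eq_false_iff_ne, ne_eq]
          exact fun h => hne ⟨hia, h⟩
        simp [hia, hjb]
      · simp [hia]

-- when p contains no space, every test fails
theorem pvScanJ_nospace {p : String} (hp : ' ' ∉ p.toList) (i : String) (js : List String) :
    pvScanJ i p js = none := by
  induction js with
  | nil => rfl
  | cons j r ih =>
    simp only [pvScanJ]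
    rw [if_neg, ih]
    intro h
    have : i ++ " " ++ j = p := by simpa using h
    have : (i ++ " " ++ j).toList = p.toList := by rw [this]
    simp at this
    exact hp (by rw [← this]; simp)

-- pointwise: A's nested scan and B's parse-and-validate pick the same value for every p
theorem pvStep_eq (p : String) :
    (match pvScanI p ["at", "as", "with"] with
      | some v => v
      | none => p) = pvStepB p := by
  unfold pvStepB
  cases hsp : pvPartSp p.toList with
  | none =>
    have hp := pvPartSp_none hsp
    simp [pvScanI, pvScanJ_nospace hp]
  | some q =>
    obtain ⟨a, b⟩ := q
    obtain ⟨hp, ha⟩ := pvPartSp_some hsp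
    have hchar := fun (i : String) (hi : ' ' ∉ i.toList) =>
      pvScanJ_char i hp ha hi pvPeriList (by decide)
    have h1 := hchar "at" (by decide)
    have h2 := hchar "as" (by decide)
    have h3 := hchar "with" (by decide)
    have hcont : pvPeriList.contains (String.ofList b)
        = (pvPeriList.find? (fun j => j.toList == b)).isSome := by
      have key : ∀ js : List String, js.contains (String.ofList b)
          = (js.find? (fun j => j.toList == b)).isSome := by
        intro js
        induction js with
        | nil => rfl
        | cons j r ih =>
          simp only [List.contains_cons, List.find?_cons]
          cases hb : (j.toList == b) with
          | true =>
            have hj : j = String.ofList b := by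
              rw [pvStr_eq_iff]; simpa using (beq_iff_eq.mp hb)
            simp [hj]
          | false =>
            have hbj : (String.ofList b == j) = false := by
              simp only [beq_eq_false_iff_ne, ne_eq] at hb ⊢
              intro h; exact hb (by rw [← h]; simp)
            simp only [hbj, Bool.false_or]
            exact ih
      exact key pvPeriList
    have key : pvScanI p ["at", "as", "with"]
        = if "at".toList = a ∨ "as".toList = a ∨ "with".toList = a then
            (pvPeriList.find? (fun j => j.toList == b)).map
              (fun j => if j == "food" then "meal" else j)
          else none := by
      simp only [pvScanI, h1, h2, h3]
      by_cases c1 : ("at" : String).toList = a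
      · have c2 : ¬ (("as" : String).toList = a) := fun h => absurd (c1.trans h.symm) (by decide)
        have c3 : ¬ (("with" : String).toList = a) := fun h => absurd (c1.trans h.symm) (by decide)
        rw [if_pos c1, if_neg c2, if_neg c3, if_pos (Or.inl c1)]
        cases pvPeriList.find? (fun j => j.toList == b) <;> rfl
      · by_cases c2 : ("as" : String).toList = a
        · have c3 : ¬ (("with" : String).toList = a) := fun h => absurd (c2.trans h.symm) (by decide)
          rw [if_neg c1, if_pos c2, if_neg c3, if_pos (Or.inr (Or.inl c2))]
          cases pvPeriList.find? (fun j => j.toList == b) <;> rfl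
        · by_cases c3 : ("with" : String).toList = a
          · rw [if_neg c1, if_neg c2, if_pos c3, if_pos (Or.inr (Or.inr c3))]
            cases pvPeriList.find? (fun j => j.toList == b) <;> rfl
          · rw [if_neg c1, if_neg c2, if_neg c3,
              if_neg (by rintro (h | h | h) <;> [exact c1 h; exact c2 h; exact c3 h])]
    rw [key]
    by_cases hcond : ("at" : String).toList = a ∨ ("as" : String).toList = a ∨ ("with" : String).toList = a
    · rw [if_pos hcond]
      have hb1 : (String.ofList a == "at" || String.ofList a == "as" || String.ofList a == "with") = true := by
        rcases hcond with h | h | h <;> rw [← h] <;> simp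
      cases hf : pvPeriList.find? (fun j => j.toList == b) with
      | none =>
        have hc : pvPeriList.contains (String.ofList b) = false := by rw [hcont, hf]; rfl
        have hcd : ((String.ofList a == "at" || String.ofList a == "as" || String.ofList a == "with")
            && pvPeriList.contains (String.ofList b)) = false := by rw [hc, Bool.and_false]
        simp only [Option.map_none]
        simp
        intro _ hmem
        exact absurd hmem (by simpa using hc)
      | some j =>
        have hj : j = String.ofList b := by
          rw [pvStr_eq_iff]; simpa using List.find?_some hf
        have hc : pvPeriList.contains (String.ofList b) = true := by rw [hcont, hf]; rfl
        have hcd : ((String.ofList a == "at" || String.ofList a == "as" || String.ofList a == "with")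
            && pvPeriList.contains (String.ofList b)) = true := by rw [hc, hb1]; rfl
        subst hj
        simp
        intro h
        have hmem : String.ofList b ∈ pvPeriList := by simpa using hc
        have hd : (String.ofList a = "at" ∨ String.ofList a = "as") ∨ String.ofList a = "with" := by
          simp at hb1
          tauto
        exact absurd hmem (h hd)
    · rw [if_neg hcond]
      have hb0 : (String.ofList a == "at" || String.ofList a == "as" || String.ofList a == "with") = false := by
        simp only [Bool.or_eq_false_iff, beq_eq_false_iff_ne, ne_eq]
        refine ⟨⟨?_, ?_⟩, ?_⟩ <;> intro h
        · exact hcond (Or.inl (by rw [← h]; simp))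
        · exact hcond (Or.inr (Or.inl (by rw [← h]; simp)))
        · exact hcond (Or.inr (Or.inr (by rw [← h]; simp)))
      simp [hb0]

theorem pvEquiv (ROW : List (String × List String)) (NAME : String) (MEDICATIONS : List String) :
    MODIFY_PERI_py ROW NAME MEDICATIONS = MODIFY_PERI_py_alt ROW NAME MEDICATIONS := by
  unfold MODIFY_PERI_py MODIFY_PERI_py_alt
  apply PySem.List.foldl_congr_mem
  intro acc x _
  rw [← pvStep_eq x]
  cases pvScanI x ["at", "as", "with"] <;> rfl

-- ===== VERDICT (by name: the statement is the Claim_ definition above) =====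
theorem MODIFY_PERI_py_spec : Claim_equal_MODIFY_PERI_py := by
  intro ROW NAME MEDICATIONS _ _
  exact pvEquiv ROW NAME MEDICATIONS
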